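-- pv_equiv track=rewrite | github.com/keysaim/logparser | logparser.py | standard_translog
-- ===== SOURCE A (Python) =====
-- def standard_translog( line ):
-- 	isInField = False
-- 	idx = 0
-- 	nidx = line.find( '"' )
-- 	if nidx < 0:
-- 		return line
--
-- 	nline = ''
-- 	while nidx >= 0:
-- 		if isInField:
-- 			segStr = line[idx:nidx]
-- 			nstr = segStr.replace( ' ', '|' )
-- 			isInField = False
-- 		else:
-- 			isInField = True
-- 			nstr = line[idx:nidx]
-- 		nline += nstr
--
-- 		idx = nidx + 1 #skip the '"'
-- 		nidx = line.find( '"', idx )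
--
-- 	nstr = line[idx:len(line)]
-- 	nline += nstr
-- 	return nline
-- ===== SOURCE B (Python) =====
-- def standard_translog(line):
--     parts = line.split('"')
--     last = len(parts) - 1
--     return ''.join(p.replace(' ', '|') if i % 2 == 1 and i != last else p
--                    for i, p in enumerate(parts))
-- ===== Notes on version B (the rewrite author's own statement) =====
-- stated objective: idiomatic
-- what changed: Replaces the stateful find-scan loop (index bookkeeping, in-field flag, repeated string concatenation) with a single split at the quote characters and a parity-indexed join that replaces spaces only in odd-indexed, non-final segments.
import Mathlib
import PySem

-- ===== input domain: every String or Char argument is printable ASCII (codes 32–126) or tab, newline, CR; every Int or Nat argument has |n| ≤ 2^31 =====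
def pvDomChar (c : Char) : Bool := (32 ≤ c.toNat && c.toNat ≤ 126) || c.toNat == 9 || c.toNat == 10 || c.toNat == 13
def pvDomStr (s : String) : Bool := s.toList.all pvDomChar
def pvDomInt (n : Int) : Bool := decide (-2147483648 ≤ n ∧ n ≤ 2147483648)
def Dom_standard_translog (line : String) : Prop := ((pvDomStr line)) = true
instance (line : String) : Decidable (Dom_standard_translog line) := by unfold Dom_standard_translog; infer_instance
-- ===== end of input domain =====

-- B replaces A's stateful find-scan with one split on '"' plus a parity-indexed join (idiomatic decomposition).


-- ===== PORT A =====
-- A's while loop: the suffix line[idx:] is passed explicitly; nidx = find of '"' in the suffix.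
def pvA_loop (rest : List Char) (isInField : Bool) (nline : List Char) : List Char :=
  let nidx := PySem.Chars.find rest ['"']
  if h : nidx < 0 then nline ++ rest
  else
    let segStr := PySem.Chars.slice rest (some 0) (some nidx)
    let nstr := if isInField then PySem.Chars.replace segStr [' '] ['|'] else segStr
    pvA_loop (PySem.Chars.slice rest (some (nidx + 1)) none) (!isInField) (nline ++ nstr)
termination_by rest.length
decreasing_by
  have h' : (0:Int) ≤ PySem.Chars.find rest ['"'] := by omega
  have hinf : ['"'] <:+: rest := by
    rw [← PySem.Chars.find_nonneg_iff]; exact h'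
  have hne : rest ≠ [] := by
    rintro rfl
    simpa using hinf.sublist.length_le
  simp only [PySem.Chars.slice_eq_listSlice]
  rw [PySem.List.slice_from rest (show (0:Int) ≤ PySem.Chars.find rest ['"'] + 1 by omega)]
  have h1 : 1 ≤ (PySem.Chars.find rest ['"'] + 1).toNat := by omega
  have h2 : 1 ≤ rest.length := by cases rest <;> simp_all
  simp only [List.length_drop]
  omega

def standard_translog (line : String) : String :=
  let nidx := PySem.Str.find line "\""
  if nidx < 0 then line
  else String.ofList (pvA_loop line.toList false [])

-- ===== PORT B =====
def standard_translog_alt (line : String) : String :=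
  let parts := PySem.Chars.splitOn line.toList ['"']
  let last : Int := (parts.length : Int) - 1
  String.ofList (PySem.Chars.join []
    ((PySem.List.enumerate parts 0).map (fun ip =>
      if ip.1 % 2 == 1 && ip.1 != last then PySem.Chars.replace ip.2 [' '] ['|'] else ip.2)))

-- ===== PRECONDITION & SPEC =====
def Spec_standard_translog (line : String) (out : String) : Prop := out = standard_translog_alt line
instance (line : String) (out : String) : Decidable (Spec_standard_translog line out) := by unfold Spec_standard_translog; infer_instance

-- ===== CLAIM (what is proved, stated in full; the proofs are below) =====
def Claim_equal_standard_translog : Prop := ∀ (line : String), Dom_standard_translog line → Spec_standard_translog line (standard_translog line)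

-- ===== LEMMAS AND PROOFS =====

-- structural reference split on '"'
def pvSq : List Char → List (List Char)
  | [] => [[]]
  | c :: cs =>
    if c = '"' then [] :: pvSq cs
    else
      match pvSq cs with
      | [] => [[c]]
      | p :: ps => (c :: p) :: ps

-- reference render: odd segments (in field) replaced, the final segment always raw
def pvRend : List (List Char) → Bool → List Char
  | [], _ => []
  | [p], _ => p
  | p :: q :: ps, b =>
    (if b then PySem.Chars.replace p [' '] ['|'] else p) ++ pvRend (q :: ps) (!b)

theorem pvSq_ne_nil (cs : List Char) : pvSq cs ≠ [] := by
  induction cs with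
  | nil => simp [pvSq]
  | cons c cs ih =>
    simp only [pvSq]
    split
    · simp
    · cases h : pvSq cs <;> simp

theorem pvSq_no_quote (cs : List Char) (h : '"' ∉ cs) : pvSq cs = [cs] := by
  induction cs with
  | nil => simp [pvSq]
  | cons c cs ih =>
    simp only [List.mem_cons, not_or] at h
    have hc : ¬ c = '"' := fun e => h.1 e.symm
    simp [pvSq, hc, ih h.2]

theorem pvSq_break (pre rest : List Char) (h : '"' ∉ pre) :
    pvSq (pre ++ '"' :: rest) = pre :: pvSq rest := by
  induction pre with
  | nil => simp [pvSq]
  | cons c p ih =>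
    simp only [List.mem_cons, not_or] at h
    have hc : ¬ c = '"' := fun e => h.1 e.symm
    simp [List.cons_append, pvSq, hc, ih h.2]

-- splitOn.go with enough fuel computes pvSq
theorem pvSplitOn_go_eq (fuel : Nat) :
    ∀ (l cur : List Char) (accl : List (List Char)), l.length ≤ fuel →
    PySem.Chars.splitOn.go ['"'] fuel l cur accl =
      accl.reverse ++ (cur.reverse ++ (pvSq l).headI) :: (pvSq l).tail := by
  induction fuel with
  | zero =>
    intro l cur accl hl
    have : l = [] := by cases l <;> simp_all
    subst this
    simp [PySem.Chars.splitOn.go, pvSq]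
  | succ n ih =>
    intro l cur accl hl
    cases l with
    | nil => simp [PySem.Chars.splitOn.go, pvSq]
    | cons c rest =>
      simp only [PySem.Chars.splitOn.go]
      by_cases hc : c = '"'
      · subst hc
        rw [if_pos (by simp [List.isPrefixOf])]
        have hd : List.drop (['"'].length) ('"' :: rest) = rest := rfl
        simp only [List.length_cons] at hl
        rw [hd, ih rest [] (cur.reverse :: accl) (by omega)]
        have hne := pvSq_ne_nil rest
        cases hsq : pvSq rest with
        | nil => exact absurd hsq hne
        | cons p ps => simp [pvSq, hsq]
      · rw [if_neg (by simp [List.isPrefixOf]; exact fun e => hc e.symm)]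
        simp only [List.length_cons] at hl
        rw [ih rest (c :: cur) accl (by omega)]
        have hne := pvSq_ne_nil rest
        cases hsq : pvSq rest with
        | nil => exact absurd hsq hne
        | cons p ps => simp [pvSq, hc, hsq]

theorem pvSplitOn_eq (cs : List Char) : PySem.Chars.splitOn cs ['"'] = pvSq cs := by
  have h := pvSplitOn_go_eq (cs.length + 1) cs [] [] (by omega)
  have hne := pvSq_ne_nil cs
  cases hsq : pvSq cs with
  | nil => exact absurd hsq hne
  | cons p ps =>
    rw [PySem.Chars.splitOn, h, hsq]
    simp

-- join with empty separator is flatten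
theorem pvJoin_nil (ls : List (List Char)) : PySem.Chars.join [] ls = ls.flatten := by
  induction ls with
  | nil => rfl
  | cons p ps ih =>
    cases ps with
    | nil => simp [PySem.Chars.join_singleton]
    | cons q qs => rw [PySem.Chars.join_cons_cons, ih]; simp

-- B's enumerate/parity/last-guard pass equals pvRend, generalized over the start index
theorem pvB_rend (parts : List (List Char)) :
    ∀ (s : Int), 0 ≤ s →
    ((PySem.List.enumerate parts s).map (fun ip =>
        if ip.1 % 2 == 1 && ip.1 != s + (parts.length : Int) - 1
        then PySem.Chars.replace ip.2 [' '] ['|'] else ip.2)).flatten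
      = pvRend parts (s % 2 == 1) := by
  induction parts with
  | nil => intro s _; simp [PySem.List.enumerate_nil, pvRend]
  | cons p ps ih =>
    intro s hs
    rw [PySem.List.enumerate_cons]
    cases ps with
    | nil => simp [pvRend]
    | cons q qs =>
      simp only [List.map_cons, List.flatten_cons]
      rw [pvRend]
      have hb : (s != s + ((p :: q :: qs).length : Int) - 1) = true := by
        simp only [bne_iff_ne, ne_eq, List.length_cons]
        push_cast
        omega
      have hpar : ((s + 1) % 2 == 1) = !(s % 2 == 1) := by
        rcases Int.emod_two_eq s with h | h <;> simp [h, beq_iff_eq] <;> omega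
      congr 1
      · rw [hb, Bool.and_true]
      · rw [← hpar, ← ih (s + 1) (by omega)]
        congr 1
        apply List.map_congr_left
        intro ip _
        have hlen : s + 1 + ((q :: qs).length : Int) - 1 = s + ((p :: q :: qs).length : Int) - 1 := by
          simp only [List.length_cons]; push_cast; ring
        rw [hlen]

-- A's loop computes pvRend ∘ pvSq
theorem pvA_loop_eq (n : Nat) :
    ∀ (cs : List Char), cs.length ≤ n → ∀ (b : Bool) (acc : List Char),
    pvA_loop cs b acc = acc ++ pvRend (pvSq cs) b := by
  induction n with
  | zero =>
    intro cs hn b acc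
    have : cs = [] := by cases cs <;> simp_all
    subst this
    rw [pvA_loop]
    simp only [PySem.Chars.find]
    simp [PySem.Chars.find.go, pvSq, pvRend]
  | succ n ih =>
    intro cs hn b acc
    rw [pvA_loop]
    by_cases hneg : PySem.Chars.find cs ['"'] < 0
    · rw [dif_pos hneg]
      have hnone : ¬ ['"'] <:+: cs := by
        rw [← PySem.Chars.find_eq_neg_one_iff]
        have := PySem.Chars.neg_one_le_find cs ['"']
        omega
      have hmem : '"' ∉ cs := by
        intro hm
        obtain ⟨s1, t1, rfl⟩ := List.append_of_mem hm
        exact hnone ⟨s1, t1, by simp⟩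
      rw [pvSq_no_quote cs hmem, pvRend]
    · rw [dif_neg hneg]
      have hge : (0:Int) ≤ PySem.Chars.find cs ['"'] := by omega
      set m := PySem.Chars.find cs ['"'] with hm
      have hspec := PySem.Chars.find_spec (s := cs) (sub := ['"']) hge
      obtain ⟨hpre, hmin⟩ := hspec
      have hlt : m.toNat < cs.length := by
        by_contra hcon
        have hcon' : cs.length ≤ m.toNat := by omega
        have hnil : cs.drop m.toNat = [] := List.drop_eq_nil_of_le hcon'
        rw [hnil] at hpre
        simp [List.prefix_nil] at hpre
      have hdrop : cs.drop m.toNat = '"' :: cs.drop (m.toNat + 1) := by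
        obtain ⟨t, ht⟩ := hpre
        have h3 : t = cs.drop (m.toNat + 1) := by
          have h4 := congrArg List.tail ht
          simpa [List.tail_drop] using h4
        rw [← ht, h3]
        rfl
      have hsplit : cs = cs.take m.toNat ++ '"' :: cs.drop (m.toNat + 1) := by
        conv_lhs => rw [← List.take_append_drop m.toNat cs]
        rw [hdrop]
      have hnoq : '"' ∉ cs.take m.toNat := by
        intro hmem
        obtain ⟨i, hi, hget⟩ := List.mem_iff_getElem.1 hmem
        have hilen : i < m.toNat := by
          simp [List.length_take] at hi
          omega
        apply hmin i hilen
        refine ⟨cs.drop (i + 1), ?_⟩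
        rw [List.singleton_append]
        have hget' : cs[i]'(by omega) = '"' := by
          rw [List.getElem_take] at hget
          exact hget
        rw [← hget']
        exact List.getElem_cons_drop (as := cs) (i := i) (h := by omega)
      -- reduce the slices
      have hs0 : PySem.List.slice cs (some 0) (some m) = cs.take m.toNat := by
        rw [PySem.List.slice_zero_start, PySem.List.slice_to cs hge]
      have hs1 : PySem.List.slice cs (some (m + 1)) none = cs.drop (m.toNat + 1) := by
        rw [PySem.List.slice_from cs (show (0:Int) ≤ m + 1 by omega)]
        congr 1
        omega
      simp only [PySem.Chars.slice_eq_listSlice, hs0, hs1]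
      rw [ih (cs.drop (m.toNat + 1)) (by simp; omega) (!b) _]
      conv_rhs => rw [hsplit]
      rw [pvSq_break _ _ hnoq]
      have hne := pvSq_ne_nil (cs.drop (m.toNat + 1))
      cases hsq : pvSq (cs.drop (m.toNat + 1)) with
      | nil => exact absurd hsq hne
      | cons p ps =>
        rw [pvRend]
        cases b <;> simp

theorem pvAlt_eq (line : String) :
    standard_translog_alt line = String.ofList (pvRend (pvSq line.toList) false) := by
  simp only [standard_translog_alt]
  rw [pvSplitOn_eq, pvJoin_nil]
  congr 1
  have := pvB_rend (pvSq line.toList) 0 le_rfl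
  simpa using this

-- ===== VERDICT (by name: the statement is the Claim_ definition above) =====
theorem standard_translog_spec : Claim_equal_standard_translog := by
  intro line _
  unfold Spec_standard_translog
  rw [pvAlt_eq]
  unfold standard_translog
  by_cases hneg : PySem.Str.find line "\"" < 0
  · rw [if_pos hneg]
    have hnone : ¬ ['"'] <:+: line.toList := by
      rw [← PySem.Chars.find_eq_neg_one_iff]
      have h1 := PySem.Chars.neg_one_le_find line.toList ['"']
      rw [PySem.Str.find_eq] at hneg
      have h2 : "\"".toList = ['"'] := rfl
      rw [h2] at hneg
      omega
    have hmem : '"' ∉ line.toList := by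
      intro hm
      obtain ⟨s1, t1, hline⟩ := List.append_of_mem hm
      exact hnone ⟨s1, t1, by simp [hline]⟩
    rw [pvSq_no_quote _ hmem, pvRend]
    exact (String.ofList_toList).symm
  · rw [if_neg hneg]
    congr 1
    have := pvA_loop_eq line.toList.length line.toList le_rfl false []
    simpa using this
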